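-- pv_equiv track=rewrite | github.com/akcarsten/chain_explorer | blockexplorer/util.py | match_markers
-- ===== SOURCE A (Python) =====
-- from typing import Tuple
--
-- def match_markers(markers: list) -> Tuple[list, list]:
--     """Function to validate and match file markers retrieve with find_file_markers.
--     For example, Start of Image (SOI) or End of Image (EOI) markers can randomly occur in image
--     as well as non-image data. The typical expectation is to find as many SOI markers as EOI markers.
--
--     This function takes the SOI markers and looks for matches in the EOI markers based on two criteria:
--     1. The EOI marker must come after the SOI marker
--     2. The total length of the SOI to EOI interval must be even, otherwise decoding to binary is not possible
--
--     Both measures improve the quality of the markers but are no guaranty that the markers are no false positive.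
--
--     Args:
--         markers: dictionary
--     """
--
--     start_of_file = markers[0]
--     end_of_file = []
--
--     for sof in start_of_file:
--         for eof in markers[1]:
--             if eof > sof and (eof + sof) % 2 == 0:
--                 end_of_file.append(eof)
--                 break
--
--     return start_of_file, end_of_file
-- ===== SOURCE B (Python) =====
-- from typing import Tuple
--
-- def match_markers(markers: list) -> Tuple[list, list]:
--     """Per-parity record (running-maximum) lists built once, then binary search
--     per SOI marker, instead of a linear scan over all EOI markers per SOI marker."""
--     start_of_file = markers[0]
--     if not start_of_file:
--         return start_of_file, []
--     recs = {0: [], 1: []}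
--     for e in markers[1]:
--         r = recs[e % 2]
--         if not r or e > r[-1]:
--             r.append(e)
--     end_of_file = []
--     for s in start_of_file:
--         r = recs[s % 2]
--         lo, hi = 0, len(r)
--         while lo < hi:
--             mid = (lo + hi) // 2
--             if r[mid] > s:
--                 hi = mid
--             else:
--                 lo = mid + 1
--         if lo < len(r):
--             end_of_file.append(r[lo])
--     return start_of_file, end_of_file
-- ===== Notes on version B (the rewrite author's own statement) =====
-- stated objective: alternative
-- what changed: Instead of rescanning all EOI markers for each SOI marker, B builds per-parity running-maximum (record) lists once and answers each SOI marker with a binary search over its parity's strictly increasing record list (worst case O(m + n log m) vs A's O(n*m); on typical inputs where A's scan breaks early the measured times are comparable).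
import Mathlib
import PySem

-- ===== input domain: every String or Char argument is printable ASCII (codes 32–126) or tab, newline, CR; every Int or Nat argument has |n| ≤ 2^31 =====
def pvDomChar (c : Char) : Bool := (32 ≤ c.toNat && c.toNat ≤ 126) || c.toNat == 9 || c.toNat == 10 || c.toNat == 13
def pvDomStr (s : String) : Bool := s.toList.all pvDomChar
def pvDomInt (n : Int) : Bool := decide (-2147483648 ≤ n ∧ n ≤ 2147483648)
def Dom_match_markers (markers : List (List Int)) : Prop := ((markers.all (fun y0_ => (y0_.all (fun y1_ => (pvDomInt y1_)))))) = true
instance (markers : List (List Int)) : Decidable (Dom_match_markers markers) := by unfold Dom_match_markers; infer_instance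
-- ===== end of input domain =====

-- B replaces A's per-SOI linear scan of all EOI markers by per-parity running-maximum
-- ("record") lists built once plus a binary search per SOI marker.

-- ===== PORT A =====
-- inner 'for eof in markers[1]: … break' of A
def findFirstA (sof : Int) : List Int → Option Int
  | [] => none
  | e :: t => if sof < e ∧ (e + sof) % 2 = 0 then some e else findFirstA sof t

def match_markers (markers : List (List Int)) : List Int × List Int :=
  let start := markers.getD 0 []
  (start, start.foldl (fun acc sof =>
      match findFirstA sof (markers.getD 1 []) with
      | some e => acc ++ [e]
      | none => acc) [])

-- ===== PORT B =====
-- Source B: 'if not r or e > r[-1]: r.append(e)'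
def addRec (r : List Int) (e : Int) : List Int :=
  match r.getLast? with
  | none => r ++ [e]
  | some b => if b < e then r ++ [e] else r

-- Source B: the first loop building recs = {0: [], 1: []}
def buildRecs (eofs : List Int) : List Int × List Int :=
  eofs.foldl (fun rs e => if e % 2 = 0 then (addRec rs.1 e, rs.2) else (rs.1, addRec rs.2 e)) ([], [])

-- Source B: the 'while lo < hi' binary search
def bsearchGo (r : List Int) (s : Int) (lo hi : Nat) : Nat :=
  if h : lo < hi then
    let mid := (lo + hi) / 2
    if s < r.getD mid 0 then bsearchGo r s lo mid else bsearchGo r s (mid + 1) hi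
  else lo
termination_by hi - lo
decreasing_by all_goals omega

def match_markers_alt (markers : List (List Int)) : List Int × List Int :=
  let start := markers.getD 0 []
  if start = [] then (start, []) else
    let recs := buildRecs (markers.getD 1 [])
    (start, start.foldl (fun acc s =>
      let r := if s % 2 = 0 then recs.1 else recs.2
      let lo := bsearchGo r s 0 r.length
      if lo < r.length then acc ++ [r.getD lo 0] else acc) [])

-- ===== PRECONDITION & SPEC =====
-- Pre_ excludes exactly the inputs on which A raises IndexError: markers with fewer than two
-- sublists, except [[ ]] where the inner loop never runs and A returns ([], []).
def Pre_match_markers (markers : List (List Int)) : Prop :=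
  2 ≤ markers.length ∨ markers = [[]]
instance (markers : List (List Int)) : Decidable (Pre_match_markers markers) := by
  unfold Pre_match_markers; infer_instance

def pvWitness_match_markers : List (List Int) := [[1, 3, -4], [2, 5, 4, -1]]

def Spec_match_markers (markers : List (List Int)) (out : List Int × List Int) : Prop := out = match_markers_alt markers
instance (markers : List (List Int)) (out : List Int × List Int) : Decidable (Spec_match_markers markers out) := by unfold Spec_match_markers; infer_instance

-- ===== CLAIM (what is proved, stated in full; the proofs are below) =====
def Claim_equal_match_markers : Prop := ∀ (markers : List (List Int)), Dom_match_markers markers → Pre_match_markers markers → Spec_match_markers markers (match_markers markers)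

-- ===== LEMMAS AND PROOFS =====

-- first element greater than s
def firstGt (s : Int) (l : List Int) : Option Int := l.find? (fun e => decide (s < e))

theorem foldl_ext' {α β : Type} (f g : α → β → α) (l : List β)
    (h : ∀ acc x, f acc x = g acc x) (a : α) : l.foldl f a = l.foldl g a := by
  induction l generalizing a with
  | nil => rfl
  | cons x t ih => simp only [List.foldl_cons, h, ih]

theorem findFirstA_eq_firstGt (s : Int) (l : List Int) :
    findFirstA s l = firstGt s (l.filter (fun e => decide (e % 2 = s % 2))) := by
  induction l with
  | nil => rfl
  | cons e t ih =>
    simp only [findFirstA, List.filter_cons]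
    by_cases hp : e % 2 = s % 2
    · rw [if_pos (show (decide (e % 2 = s % 2)) = true by simp [hp])]
      by_cases hlt : s < e
      · rw [if_pos ⟨hlt, by omega⟩]
        unfold firstGt
        rw [List.find?_cons_of_pos (by simpa using hlt)]
      · rw [if_neg (by rintro ⟨h1, h2⟩; exact hlt h1)]
        unfold firstGt
        rw [List.find?_cons_of_neg (by simpa using hlt)]
        exact ih
    · rw [if_neg (by rintro ⟨h1, h2⟩; exact hp (by omega))]
      rw [if_neg (by simp [hp])]
      exact ih

theorem buildRecs_split (l : List Int) (r0 r1 : List Int) :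
    l.foldl (fun rs e => if e % 2 = 0 then (addRec rs.1 e, rs.2) else (rs.1, addRec rs.2 e)) (r0, r1)
      = ((l.filter (fun e => decide (e % 2 = 0))).foldl addRec r0,
         (l.filter (fun e => decide (¬ e % 2 = 0))).foldl addRec r1) := by
  induction l generalizing r0 r1 with
  | nil => rfl
  | cons e t ih =>
    simp only [List.foldl_cons, List.filter_cons]
    by_cases h : e % 2 = 0
    · have h1 : (decide (e % 2 = 0)) = true := by simp [h]
      have h2 : (decide (¬ e % 2 = 0)) = false := by simp [h]
      rw [if_pos h, h1, h2, if_pos rfl, if_neg (by simp), ih, List.foldl_cons]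
    · have h1 : (decide (e % 2 = 0)) = false := by simp [h]
      have h2 : (decide (¬ e % 2 = 0)) = true := by simp [h]
      rw [if_neg h, h1, h2, if_pos rfl, if_neg (by simp), ih, List.foldl_cons]

-- running maximum of the processed list, tracked by getLast? of the record list
def maxOpt (m : Option Int) (e : Int) : Int := match m with | none => e | some b => max b e

theorem addRec_of_last_none (r : List Int) (e : Int) (h : r.getLast? = none) :
    addRec r e = r ++ [e] := by
  unfold addRec; split <;> simp_all

theorem addRec_of_last_some (r : List Int) (e b : Int) (h : r.getLast? = some b) :
    addRec r e = if b < e then r ++ [e] else r := by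
  unfold addRec; split <;> simp_all

theorem addRec_getLast? (r : List Int) (e : Int) :
    (addRec r e).getLast? = some (maxOpt r.getLast? e) := by
  cases hr : r.getLast? with
  | none => rw [addRec_of_last_none r e hr, List.getLast?_concat]; rfl
  | some b =>
    rw [addRec_of_last_some r e b hr]
    by_cases h : b < e
    · rw [if_pos h, List.getLast?_concat]
      simp only [maxOpt]
      congr 1
      exact (max_eq_right (le_of_lt h)).symm
    · rw [if_neg h, hr]
      simp only [maxOpt]
      congr 1
      exact (max_eq_left (by omega)).symm

theorem foldl_addRec_getLast? (l : List Int) (r : List Int) :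
    (l.foldl addRec r).getLast? = l.foldl (fun m e => some (maxOpt m e)) r.getLast? := by
  induction l generalizing r with
  | nil => rfl
  | cons e t ih => simp only [List.foldl_cons, ih, addRec_getLast?]

theorem foldl_maxOpt_bound (l : List Int) :
    ∀ (m : Option Int) (b : Int), l.foldl (fun m e => some (maxOpt m e)) m = some b →
      (∀ x ∈ l, x ≤ b) ∧ (∀ a, m = some a → a ≤ b) := by
  induction l with
  | nil =>
    intro m b h
    simp only [List.foldl_nil] at h
    exact ⟨by simp, fun a ha => by rw [ha] at h; injection h with h; omega⟩
  | cons e t ih =>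
    intro m b h
    simp only [List.foldl_cons] at h
    obtain ⟨hall, hacc⟩ := ih (some (maxOpt m e)) b h
    have he : maxOpt m e ≤ b := hacc _ rfl
    refine ⟨?_, ?_⟩
    · intro x hx
      rcases List.mem_cons.mp hx with rfl | hx
      · cases m <;> simp only [maxOpt] at he <;> omega
      · exact hall x hx
    · intro a ha
      rw [ha] at he; simp only [maxOpt] at he; omega

theorem foldl_maxOpt_none (l : List Int) (h : l.foldl (fun m e => some (maxOpt m e)) none = none) :
    l = [] := by
  cases l with
  | nil => rfl
  | cons e t =>
    exfalso
    simp only [List.foldl_cons] at h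
    have key : ∀ (t : List Int) (a : Int), t.foldl (fun m e => some (maxOpt m e)) (some a) ≠ none := by
      intro t
      induction t with
      | nil => simp
      | cons x xs ih => intro a; simpa using ih (maxOpt (some a) x)
    exact key t _ h

theorem firstGt_append (s : Int) (l1 l2 : List Int) :
    firstGt s (l1 ++ l2) = (firstGt s l1).or (firstGt s l2) := by
  simp [firstGt, List.find?_append]

-- the record list preserves the first element greater than s
theorem foldl_addRec_firstGt (s : Int) (l : List Int) :
    firstGt s (l.foldl addRec []) = firstGt s l := by
  induction l using List.reverseRecOn with
  | nil => rfl
  | append_singleton l e ih =>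
    rw [List.foldl_append, List.foldl_cons, List.foldl_nil, firstGt_append]
    cases hlast : (l.foldl addRec []).getLast? with
    | none =>
      have hRnil : l.foldl addRec [] = [] := List.getLast?_eq_none_iff.mp hlast
      have hlnil : l = [] := by
        have h1 := foldl_addRec_getLast? l []
        rw [hlast] at h1
        exact foldl_maxOpt_none l (by simpa using h1.symm)
      subst hlnil
      simp [addRec, firstGt]
    | some b =>
      have hbound : ∀ x ∈ l, x ≤ b := by
        have h1 := foldl_addRec_getLast? l []
        rw [hlast] at h1
        exact (foldl_maxOpt_bound l none b (by simpa using h1.symm)).1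
      rw [addRec_of_last_some _ e b hlast]
      by_cases hbe : b < e
      · rw [if_pos hbe, firstGt_append, ih]
      · rw [if_neg hbe]
        by_cases hse : s < e
        · have hsb : s < b := by
            rcases Int.lt_or_le s b with h | h
            · exact h
            · omega
          have hbR : b ∈ l.foldl addRec [] := List.mem_of_getLast? hlast
          have hsome : (firstGt s (l.foldl addRec [])).isSome := by
            unfold firstGt
            exact List.find?_isSome.mpr ⟨b, hbR, by simpa using hsb⟩
          rcases Option.isSome_iff_exists.mp hsome with ⟨v, hv⟩
          rw [hv, ih.symm.trans hv]
          rfl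
        · have h0 : firstGt s [e] = none := by simp [firstGt, hse]
          rw [h0, ih]
          cases firstGt s l <;> rfl

-- strict sortedness of the record list
theorem addRec_pairwise (r : List Int) (e : Int) (h : r.Pairwise (· < ·)) :
    (addRec r e).Pairwise (· < ·) := by
  cases hlast : r.getLast? with
  | none => rw [addRec_of_last_none r e hlast]; simp [List.getLast?_eq_none_iff.mp hlast]
  | some b =>
    rw [addRec_of_last_some r e b hlast]
    by_cases hbe : b < e
    · rw [if_pos hbe, List.pairwise_append]
      refine ⟨h, by simp, ?_⟩
      intro x hx y hy
      simp only [List.mem_singleton] at hy; subst hy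
      have hxb : x ≤ b := by
        rcases List.getLast?_eq_some_iff.mp hlast with ⟨l', rfl⟩
        rw [List.pairwise_append] at h
        rcases List.mem_append.mp hx with hx' | hx'
        · exact le_of_lt (h.2.2 x hx' b (by simp))
        · simp only [List.mem_singleton] at hx'; omega
      omega
    · rw [if_neg hbe]; exact h

theorem foldl_addRec_pairwise (l : List Int) (r : List Int) (h : r.Pairwise (· < ·)) :
    (l.foldl addRec r).Pairwise (· < ·) := by
  induction l generalizing r with
  | nil => exact h
  | cons e t ih => exact ih _ (addRec_pairwise _ _ h)

theorem pairwise_getD_mono (r : List Int) (h : r.Pairwise (· < ·)) :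
    ∀ i j, i ≤ j → j < r.length → r.getD i 0 ≤ r.getD j 0 := by
  intro i j hij hj
  rcases Nat.eq_or_lt_of_le hij with rfl | hlt
  · exact le_refl _
  · have hi : i < r.length := lt_trans hlt hj
    rw [List.getD_eq_getElem r 0 hi, List.getD_eq_getElem r 0 hj]
    exact le_of_lt ((List.pairwise_iff_getElem.mp h) i j hi hj hlt)

theorem bsearchGo_eq_left (r : List Int) (s : Int) (lo hi : Nat) (h : lo < hi)
    (hm : s < r.getD ((lo + hi) / 2) 0) :
    bsearchGo r s lo hi = bsearchGo r s lo ((lo + hi) / 2) := by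
  rw [bsearchGo]; simp only [dif_pos h]; rw [if_pos hm]

theorem bsearchGo_eq_right (r : List Int) (s : Int) (lo hi : Nat) (h : lo < hi)
    (hm : ¬ s < r.getD ((lo + hi) / 2) 0) :
    bsearchGo r s lo hi = bsearchGo r s ((lo + hi) / 2 + 1) hi := by
  rw [bsearchGo]; simp only [dif_pos h]; rw [if_neg hm]

theorem bsearchGo_eq_done (r : List Int) (s : Int) (lo hi : Nat) (h : ¬ lo < hi) :
    bsearchGo r s lo hi = lo := by
  rw [bsearchGo]; simp only [dif_neg h]

-- binary search specification
theorem bsearchGo_spec (r : List Int)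
    (hsort : ∀ i j, i ≤ j → j < r.length → r.getD i 0 ≤ r.getD j 0) (s : Int) :
    ∀ (lo hi : Nat), lo ≤ hi → hi ≤ r.length →
      (∀ i, i < lo → ¬ s < r.getD i 0) →
      (∀ i, hi ≤ i → i < r.length → s < r.getD i 0) →
      (∀ i, i < bsearchGo r s lo hi → ¬ s < r.getD i 0) ∧
      (∀ i, bsearchGo r s lo hi ≤ i → i < r.length → s < r.getD i 0) ∧
      bsearchGo r s lo hi ≤ r.length := by
  intro lo hi
  induction lo, hi using bsearchGo.induct r s with
  | case1 lo hi h mid hmid ih =>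
    intro _ hhr hlow hhigh
    rw [bsearchGo_eq_left r s lo hi h hmid]
    exact ih (by omega) (by omega)
      hlow
      (fun i hmi hir => lt_of_lt_of_le hmid (hsort _ i hmi hir))
  | case2 lo hi h mid hmid ih =>
    intro _ hhr hlow hhigh
    have hmid' : ¬ s < r.getD ((lo + hi) / 2) 0 := hmid
    rw [bsearchGo_eq_right r s lo hi h hmid']
    have hmlt : (lo + hi) / 2 < r.length := by omega
    refine ih (by omega) hhr ?_ hhigh
    intro i hi1 hlt
    have hle : r.getD i 0 ≤ r.getD ((lo + hi) / 2) 0 := hsort i _ (by omega) hmlt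
    omega
  | case3 lo hi h =>
    intro hlh hhr hlow hhigh
    rw [bsearchGo_eq_done r s lo hi h]
    exact ⟨hlow, fun i hli hir => hhigh i (by omega) hir, by omega⟩

theorem find?_of_first (p : Int → Bool) :
    ∀ (r : List Int) (k : Nat), k < r.length →
      (∀ i, i < k → p (r.getD i 0) = false) → p (r.getD k 0) = true →
      r.find? p = some (r.getD k 0) := by
  intro r
  induction r with
  | nil => intro k hk; simp at hk
  | cons x t ih =>
    intro k hk hpre hk2
    cases k with
    | zero =>
      simp only [List.getD_cons_zero] at hk2
      simp [hk2]
    | succ k =>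
      have hx : p x = false := by
        have h0 := hpre 0 (Nat.succ_pos k)
        simpa using h0
      rw [List.find?_cons_of_neg (by simp [hx])]
      simp only [List.getD_cons_succ] at hk2 ⊢
      exact ih k (by simpa using hk) (fun i hi => by simpa using hpre (i + 1) (by omega)) hk2

theorem find?_none_of_all (p : Int → Bool) (r : List Int)
    (h : ∀ i, i < r.length → p (r.getD i 0) = false) : r.find? p = none := by
  apply List.find?_eq_none.mpr
  intro x hx
  rcases List.mem_iff_getElem.mp hx with ⟨i, hi, rfl⟩
  have := h i hi
  rw [List.getD_eq_getElem r 0 hi] at this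
  simp [this]

-- the binary-search lookup over a strictly increasing list computes firstGt
theorem bsearch_firstGt (r : List Int) (h : r.Pairwise (· < ·)) (s : Int) :
    (if bsearchGo r s 0 r.length < r.length then some (r.getD (bsearchGo r s 0 r.length) 0) else none)
      = firstGt s r := by
  have hsort := pairwise_getD_mono r h
  obtain ⟨h1, h2, h3⟩ := bsearchGo_spec r hsort s 0 r.length (Nat.zero_le _) (le_refl _)
    (by omega) (fun i hi hir => by omega)
  by_cases hk : bsearchGo r s 0 r.length < r.length
  · rw [if_pos hk]
    unfold firstGt
    rw [find?_of_first _ r _ hk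
      (fun i hi => by simpa using h1 i hi)
      (by simpa using h2 _ (le_refl _) hk)]
  · rw [if_neg hk]
    unfold firstGt
    exact (find?_none_of_all _ r (fun i hi => by simpa using h1 i (by omega))).symm

-- per start marker: B's record lookup equals A's inner scan
theorem step_eq (eofs : List Int) (s : Int) :
    (let r := if s % 2 = 0 then (buildRecs eofs).1 else (buildRecs eofs).2
     if bsearchGo r s 0 r.length < r.length then some (r.getD (bsearchGo r s 0 r.length) 0) else none)
      = findFirstA s eofs := by
  have hsplit := buildRecs_split eofs [] []
  by_cases hs : s % 2 = 0
  · have hr : (if s % 2 = 0 then (buildRecs eofs).1 else (buildRecs eofs).2)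
        = (eofs.filter (fun e => decide (e % 2 = 0))).foldl addRec [] := by
      rw [if_pos hs]; unfold buildRecs; rw [hsplit]
    simp only [hr]
    rw [bsearch_firstGt _ (foldl_addRec_pairwise _ [] (by simp)), foldl_addRec_firstGt,
      findFirstA_eq_firstGt]
    congr 1
    apply List.filter_congr
    intro x _
    simp only [decide_eq_decide]
    omega
  · have hr : (if s % 2 = 0 then (buildRecs eofs).1 else (buildRecs eofs).2)
        = (eofs.filter (fun e => decide (¬ e % 2 = 0))).foldl addRec [] := by
      rw [if_neg hs]; unfold buildRecs; rw [hsplit]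
    simp only [hr]
    rw [bsearch_firstGt _ (foldl_addRec_pairwise _ [] (by simp)), foldl_addRec_firstGt,
      findFirstA_eq_firstGt]
    congr 1
    apply List.filter_congr
    intro x _
    simp only [decide_eq_decide]
    omega

-- ===== VERDICT (by name: the statement is the Claim_ definition above) =====
theorem match_markers_spec : Claim_equal_match_markers := by
  intro markers _ hPre
  unfold Spec_match_markers
  rcases hPre with h2 | rfl
  · match markers, h2 with
    | a :: b :: t, _ =>
      show match_markers (a :: b :: t) = match_markers_alt (a :: b :: t)
      unfold match_markers match_markers_alt
      simp only [List.getD_cons_zero, List.getD_cons_succ]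
      by_cases ha : a = []
      · subst ha; rw [if_pos rfl]
        rfl
      · rw [if_neg ha]
        refine Prod.ext rfl ?_
        show a.foldl _ [] = a.foldl _ []
        apply foldl_ext'
        intro acc s
        have hstep := step_eq b s
        simp only at hstep ⊢
        rw [← hstep]
        by_cases hk :
            bsearchGo (if s % 2 = 0 then (buildRecs b).1 else (buildRecs b).2) s 0
                (if s % 2 = 0 then (buildRecs b).1 else (buildRecs b).2).length
              < (if s % 2 = 0 then (buildRecs b).1 else (buildRecs b).2).length
        · rw [if_pos hk, if_pos hk]
        · rw [if_neg hk, if_neg hk]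
  · decide
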